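-- pv_equiv track=rewrite | github.com/passingbreeze/LearnAlgorithm | pyprac/180502lab.py | calstr
-- ===== SOURCE A (Python) =====
-- def calstr(l, dicstr) :
--     sum = ""
--     result = 0
--     for word in l:
--         for idx in dicstr.keys():
--             if word == dicstr[idx] :
--                 sum += str(idx)
--     result = int(sum)
--     return result
-- ===== SOURCE B (Python) =====
-- def calstr(l, dicstr):
--     index = {}
--     for k, v in dicstr.items():
--         index[v] = index.get(v, "") + str(k)
--     return int("".join(index.get(word, "") for word in l))
-- ===== Notes on version B (the rewrite author's own statement) =====
-- stated objective: faster
-- what changed: B builds a value->concatenated-digits dict in one pass over dicstr and then makes a single join pass over the words, replacing A's scan of every dict key for every word.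
import Mathlib
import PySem

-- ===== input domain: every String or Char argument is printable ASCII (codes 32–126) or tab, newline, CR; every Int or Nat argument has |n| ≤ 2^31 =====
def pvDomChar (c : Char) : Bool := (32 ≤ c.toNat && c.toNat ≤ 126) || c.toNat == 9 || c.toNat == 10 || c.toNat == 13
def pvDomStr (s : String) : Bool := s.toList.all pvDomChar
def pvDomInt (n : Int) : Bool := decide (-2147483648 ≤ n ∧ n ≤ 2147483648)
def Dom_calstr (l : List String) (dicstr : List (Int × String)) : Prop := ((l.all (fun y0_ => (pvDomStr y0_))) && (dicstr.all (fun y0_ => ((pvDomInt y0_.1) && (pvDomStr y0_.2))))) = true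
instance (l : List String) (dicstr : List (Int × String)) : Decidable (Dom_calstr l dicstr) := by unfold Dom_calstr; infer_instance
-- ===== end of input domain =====

-- B replaces A's nested scan (every word × every dict key) by a value→concatenated-digits
-- index built in one pass over the dict, then a single join pass over the words (one pass each instead of a nested scan).

-- ===== PORT A =====
-- literal port of A; strings are carried as List Char (PySem.Chars side).
-- int(sum) is PySem.Int.ofChars?; where Python raises ValueError (excluded by Pre_) the
-- port returns 0.
def calstr (l : List String) (dicstr : List (Int × String)) : Int :=
  let d := PySem.Dict.ofList dicstr
  let sum := l.foldl (fun s word =>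
    d.keys.foldl (fun s idx =>
      if word == d.getD idx "" then s ++ PySem.Int.toChars idx else s) s) ([] : List Char)
  (PySem.Int.ofChars? sum).getD 0

-- ===== PORT B =====
def calstr_alt (l : List String) (dicstr : List (Int × String)) : Int :=
  let index := (PySem.Dict.ofList dicstr).items.foldl
    (fun ix p => ix.insert p.2 (ix.getD p.2 [] ++ PySem.Int.toChars p.1))
    (PySem.Dict.empty : PySem.Dict String (List Char))
  let s := (l.map (fun word => index.getD word ([] : List Char))).flatten
  (PySem.Int.ofChars? s).getD 0

-- ===== PRECONDITION & SPEC =====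
-- the keys matched by the words of l, in the order the two programs concatenate them
def pvMatchedKeys_calstr (l : List String) (dicstr : List (Int × String)) : List Int :=
  l.flatMap (fun w => (PySem.Dict.ofList dicstr).items.filterMap
    (fun p => if p.2 == w then some p.1 else none))

-- Pre_ excludes exactly the inputs where int(sum) raises ValueError in both programs:
-- no word matches any dict value (sum = ""), or a negative matched key appears after the
-- first one (its '-' lands mid-string).
def Pre_calstr (l : List String) (dicstr : List (Int × String)) : Prop :=
  pvMatchedKeys_calstr l dicstr ≠ [] ∧ ∀ k ∈ (pvMatchedKeys_calstr l dicstr).tail, 0 ≤ k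
instance (l : List String) (dicstr : List (Int × String)) : Decidable (Pre_calstr l dicstr) := by
  unfold Pre_calstr; infer_instance

def pvWitness_calstr : List String × (List (Int × String)) := (["a", "b"], [(3, "a"), (15, "b")])

def Spec_calstr (l : List String) (dicstr : List (Int × String)) (out : Int) : Prop := out = calstr_alt l dicstr
instance (l : List String) (dicstr : List (Int × String)) (out : Int) : Decidable (Spec_calstr l dicstr out) := by unfold Spec_calstr; infer_instance

-- ===== CLAIM (what is proved, stated in full; the proofs are below) =====
def Claim_equal_calstr : Prop := ∀ (l : List String) (dicstr : List (Int × String)), Dom_calstr l dicstr → Pre_calstr l dicstr → Spec_calstr l dicstr (calstr l dicstr)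

-- ===== LEMMAS AND PROOFS =====

-- the characters contributed by one word: the decimal digits of each matching pair's key
def mkChars (ps : List (Int × String)) (w : String) : List Char :=
  ((ps.filter (fun p => w == p.2)).map (fun p => PySem.Int.toChars p.1)).flatten

theorem foldl_if_append_eq_mkChars (ps : List (Int × String)) (w : String) (s : List Char) :
    ps.foldl (fun s p => if w == p.2 then s ++ PySem.Int.toChars p.1 else s) s
      = s ++ mkChars ps w := by
  induction ps generalizing s with
  | nil => simp [mkChars]
  | cons p ps ih =>
    simp only [List.foldl_cons]
    rw [ih]
    cases h : (w == p.2) with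
    | true => simp [mkChars, h, List.append_assoc]
    | false => simp [mkChars, h]

theorem getD_index_foldl (ps : List (Int × String)) (w : String)
    (ix : PySem.Dict String (List Char)) :
    (ps.foldl (fun ix p => ix.insert p.2 (ix.getD p.2 [] ++ PySem.Int.toChars p.1)) ix).getD w []
      = ix.getD w [] ++ mkChars ps w := by
  induction ps generalizing ix with
  | nil => simp [mkChars]
  | cons p ps ih =>
    simp only [List.foldl_cons]
    rw [ih]
    by_cases h : w = p.2
    · subst h
      rw [PySem.Dict.getD_insert_self]
      simp [mkChars, List.append_assoc]
    · rw [PySem.Dict.getD_insert_of_ne _ _ _ h]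
      have hb : (w == p.2) = false := by simp [h]
      simp [mkChars, hb]

theorem calstr_eq_calstr_alt (l : List String) (dicstr : List (Int × String)) :
    calstr l dicstr = calstr_alt l dicstr := by
  unfold calstr calstr_alt
  set d := PySem.Dict.ofList dicstr with hd
  have hnd : d.keys.Nodup := PySem.Dict.nodup_keys_ofList dicstr
  have hitems := PySem.Dict.items_eq_map_keys d hnd ""
  -- A's inner loop over keys is the same loop over items
  have hA : ∀ (w : String) (s : List Char),
      d.keys.foldl (fun s idx =>
        if w == d.getD idx "" then s ++ PySem.Int.toChars idx else s) s
        = s ++ mkChars d.items w := by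
    intro w s
    rw [← foldl_if_append_eq_mkChars d.items w s, hitems, List.foldl_map]
  -- hence A's accumulated string is the flatMap of per-word contributions
  have hsum : l.foldl (fun s word =>
      d.keys.foldl (fun s idx =>
        if word == d.getD idx "" then s ++ PySem.Int.toChars idx else s) s) ([] : List Char)
      = l.flatMap (mkChars d.items) := by
    have : l.foldl (fun s word =>
        d.keys.foldl (fun s idx =>
          if word == d.getD idx "" then s ++ PySem.Int.toChars idx else s) s) ([] : List Char)
        = l.foldl (fun s word => s ++ mkChars d.items word) ([] : List Char) := by
      congr 1
      funext s w
      exact hA w s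
    rw [this, PySem.List.foldl_append_eq_flatMap]
    simp
  -- B's joined string is the same flatMap
  have hB : (l.map (fun word =>
      (d.items.foldl (fun ix p => ix.insert p.2 (ix.getD p.2 [] ++ PySem.Int.toChars p.1))
        (PySem.Dict.empty : PySem.Dict String (List Char))).getD word ([] : List Char))).flatten
      = l.flatMap (mkChars d.items) := by
    rw [← List.flatMap_def]
    congr 1
    funext w
    rw [getD_index_foldl]
    rw [PySem.Dict.getD_empty, List.nil_append]
  simp only [hsum, hB]

-- ===== VERDICT (by name: the statement is the Claim_ definition above) =====
theorem calstr_spec : Claim_equal_calstr := by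
  intro l dicstr _ _
  unfold Spec_calstr
  exact calstr_eq_calstr_alt l dicstr
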